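-- pv_equiv track=rewrite | github.com/thealper2/codewars-solutions | 7-kyu/count_the_combinations.py | num_combo
-- ===== SOURCE A (Python) =====
-- def num_combo(xs: list, n: int):
--     l = len(xs)
--     count = 0
--
--     for i in range(l):
--         s = sum(xs[:i]) + sum(xs[i + 1 :])
--         if s == n:
--             count += 1
--
--     return count
-- ===== SOURCE B (Python) =====
-- def num_combo(xs: list, n: int):
--     # removing xs[i] leaves sum n iff xs[i] == sum(xs) - n
--     total = sum(xs)
--     return xs.count(total - n)
-- ===== Notes on version B (the rewrite author's own statement) =====
-- stated objective: faster
-- what changed: Replaces the per-index rebuild of sum(xs[:i])+sum(xs[i+1:]) by one total sum and a single count of elements equal to total-n.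
import Mathlib
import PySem

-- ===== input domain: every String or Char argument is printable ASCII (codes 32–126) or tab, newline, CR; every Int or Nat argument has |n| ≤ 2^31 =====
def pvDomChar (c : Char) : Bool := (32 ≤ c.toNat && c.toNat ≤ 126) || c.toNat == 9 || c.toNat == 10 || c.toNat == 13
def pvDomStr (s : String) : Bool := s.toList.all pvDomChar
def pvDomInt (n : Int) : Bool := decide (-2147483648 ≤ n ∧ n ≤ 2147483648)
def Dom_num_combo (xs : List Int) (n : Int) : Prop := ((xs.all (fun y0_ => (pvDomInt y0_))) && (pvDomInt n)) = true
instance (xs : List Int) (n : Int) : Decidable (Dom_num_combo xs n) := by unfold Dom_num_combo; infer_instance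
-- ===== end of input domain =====

-- B computes sum(xs) once and counts elements equal to total - n, instead of re-summing both slices per index.


-- ===== PORT A =====
def num_combo (xs : List Int) (n : Int) : Int :=
  let l : Int := xs.length
  (PySem.List.pyRange 0 l 1).foldl
    (fun count i =>
      let s := (PySem.List.slice xs none (some i)).sum + (PySem.List.slice xs (some (i + 1)) none).sum
      if s == n then count + 1 else count) 0

-- ===== PORT B =====
def num_combo_alt (xs : List Int) (n : Int) : Int :=
  let total := xs.sum
  ((PySem.List.count xs (total - n) : Nat) : Int)

-- ===== PRECONDITION & SPEC =====
def Spec_num_combo (xs : List Int) (n : Int) (out : Int) : Prop := out = num_combo_alt xs n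
instance (xs : List Int) (n : Int) (out : Int) : Decidable (Spec_num_combo xs n out) := by unfold Spec_num_combo; infer_instance

-- ===== CLAIM (what is proved, stated in full; the proofs are below) =====
def Claim_equal_num_combo : Prop := ∀ (xs : List Int) (n : Int), Dom_num_combo xs n → Spec_num_combo xs n (num_combo xs n)

-- ===== LEMMAS AND PROOFS =====

-- removing the k-th element: both slice sums add up to the total minus xs[k]
theorem pv_sum_split (xs : List Int) (k : Nat) (h : k < xs.length) :
    (xs.take k).sum + (xs.drop (k + 1)).sum = xs.sum - xs.getD k 0 := by
  have h1 : (xs.take k).sum + (xs.drop k).sum = xs.sum := List.sum_take_add_sum_drop xs k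
  have h2 : xs.drop k = xs[k] :: xs.drop (k + 1) := List.drop_eq_getElem_cons h
  have h3 : xs.getD k 0 = xs[k] := by
    simp [List.getD_eq_getElem?_getD, List.getElem?_eq_getElem h]
  rw [h2, List.sum_cons] at h1
  omega

-- counting indices whose element equals v is counting occurrences of v
theorem pv_countP_range_getD (xs : List Int) (v : Int) :
    List.countP (fun k => xs.getD k 0 == v) (List.range xs.length) = List.count v xs := by
  induction xs with
  | nil => simp
  | cons x t ih =>
    rw [List.length_cons, List.range_succ_eq_map, List.countP_cons, List.countP_map,
        List.count_cons]
    simp only [Function.comp_def, List.getD_cons_succ, List.getD_cons_zero, ih]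

-- ===== VERDICT (by name: the statement is the Claim_ definition above) =====
theorem num_combo_spec : Claim_equal_num_combo := by
  intro xs n _
  unfold Spec_num_combo num_combo num_combo_alt
  rw [PySem.List.foldl_count_if
        (fun i => (PySem.List.slice xs none (some i)).sum
          + (PySem.List.slice xs (some (i + 1)) none).sum == n)]
  rw [PySem.List.pyRange_zero_nat, List.countP_map]
  rw [List.countP_congr (q := fun k => xs.getD k 0 == xs.sum - n) ?_]
  · rw [pv_countP_range_getD]
    simp [PySem.List.count_eq]
  · intro k hk
    have hlt : k < xs.length := List.mem_range.mp hk
    simp only [Function.comp_def, PySem.List.slice_to_natCast]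
    have : ((k : Int) + 1) = ((k + 1 : Nat) : Int) := by push_cast; ring
    rw [this, PySem.List.slice_from_natCast, pv_sum_split xs k hlt]
    simp only [beq_iff_eq]
    omega
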